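-- pv_equiv track=rewrite | github.com/amatacz/US-Medical-Insurance-Codecademy | us-medical-insurance-costs.py | smokers_age_representation_calc
-- ===== SOURCE A (Python) =====
-- def smokers_age_representation_calc(smokers_only):
--     smokers_age_representation = [0,0,0,0,0]
--     for age in smokers_only['age']:
--         if age <= 25:
--             smokers_age_representation[0] += 1
--         elif age <=35:
--             smokers_age_representation[1] += 1
--         elif age <= 45:
--             smokers_age_representation[2] += 1
--         elif age <= 55:
--             smokers_age_representation[3] += 1
--         else:
--             smokers_age_representation[4] += 1
--     return smokers_age_representation
-- ===== SOURCE B (Python) =====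
-- def smokers_age_representation_calc(smokers_only):
--     # Cumulative counts at each boundary, then adjacent differences give the buckets.
--     ages = smokers_only['age']
--     cuts = [25, 35, 45, 55]
--     totals = [sum(1 for a in ages if a <= c) for c in cuts] + [len(ages)]
--     return [totals[0]] + [totals[i] - totals[i - 1] for i in range(1, 5)]
-- ===== Notes on version B (the rewrite author's own statement) =====
-- stated objective: alternative
-- what changed: Replaces the per-element five-way if/elif cascade mutating a counter array with per-boundary cumulative counts (count of ages <= each cut) whose adjacent differences yield the buckets.
import Mathlib
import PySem

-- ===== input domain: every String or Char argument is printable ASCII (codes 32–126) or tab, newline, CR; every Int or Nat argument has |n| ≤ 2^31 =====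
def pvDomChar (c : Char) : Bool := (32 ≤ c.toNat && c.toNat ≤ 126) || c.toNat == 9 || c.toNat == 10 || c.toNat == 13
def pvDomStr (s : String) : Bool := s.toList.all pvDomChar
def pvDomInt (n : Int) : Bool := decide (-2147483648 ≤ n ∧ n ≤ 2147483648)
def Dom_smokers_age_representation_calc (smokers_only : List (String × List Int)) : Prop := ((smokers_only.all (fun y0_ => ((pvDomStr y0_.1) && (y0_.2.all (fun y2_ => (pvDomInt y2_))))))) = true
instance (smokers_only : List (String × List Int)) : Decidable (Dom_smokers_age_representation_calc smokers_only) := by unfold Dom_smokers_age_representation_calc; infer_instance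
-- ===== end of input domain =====

-- B replaces the five-way if/elif cascade with cumulative boundary counts and adjacent
-- differences (objective: alternative, same O(n) cost).

-- ===== PORT A =====
-- dict lookup: first match wins (KeyError, i.e. none, if the key is absent — excluded by Pre_)
def pvLookupAge (smokers_only : List (String × List Int)) : Option (List Int) :=
  (smokers_only.find? (fun p => p.1 == "age")).map (·.2)

-- one iteration of A's loop body: the if/elif cascade incrementing one slot of the
-- 5-element list (indices 0..4 are always in range, so List.set/getD are exact here)
def pvStepA (s : List Int) (age : Int) : List Int :=
  if age ≤ 25 then s.set 0 (s.getD 0 0 + 1)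
  else if age ≤ 35 then s.set 1 (s.getD 1 0 + 1)
  else if age ≤ 45 then s.set 2 (s.getD 2 0 + 1)
  else if age ≤ 55 then s.set 3 (s.getD 3 0 + 1)
  else s.set 4 (s.getD 4 0 + 1)

def smokers_age_representation_calc (smokers_only : List (String × List Int)) : List Int :=
  match pvLookupAge smokers_only with
  | none => []   -- Python raises KeyError here; excluded by Pre_
  | some ages => ages.foldl pvStepA [0, 0, 0, 0, 0]

-- ===== PORT B =====
def smokers_age_representation_calc_alt (smokers_only : List (String × List Int)) : List Int :=
  match pvLookupAge smokers_only with
  | none => []   -- Python raises KeyError here; excluded by Pre_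
  | some ages =>
    let cuts : List Int := [25, 35, 45, 55]
    -- sum(1 for a in ages if a <= c) is List.countP
    let totals : List Int :=
      (cuts.map (fun c => ((ages.countP (fun a => decide (a ≤ c))) : Int))) ++ [(ages.length : Int)]
    (totals.getD 0 0) :: ([1, 2, 3, 4].map (fun i => totals.getD i 0 - totals.getD (i - 1) 0))

-- ===== PRECONDITION & SPEC =====
-- Pre_ excludes only inputs without an 'age' key, on which Python A raises KeyError.
def Pre_smokers_age_representation_calc (smokers_only : List (String × List Int)) : Prop :=
  "age" ∈ smokers_only.map (·.1)
instance (smokers_only : List (String × List Int)) : Decidable (Pre_smokers_age_representation_calc smokers_only) := by unfold Pre_smokers_age_representation_calc; infer_instance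

def pvWitness_smokers_age_representation_calc : (List (String × List Int)) := [("age", [20, 30, 60])]

def Spec_smokers_age_representation_calc (smokers_only : List (String × List Int)) (out : List Int) : Prop := out = smokers_age_representation_calc_alt smokers_only
instance (smokers_only : List (String × List Int)) (out : List Int) : Decidable (Spec_smokers_age_representation_calc smokers_only out) := by unfold Spec_smokers_age_representation_calc; infer_instance

-- ===== CLAIM (what is proved, stated in full; the proofs are below) =====
def Claim_equal_smokers_age_representation_calc : Prop := ∀ (smokers_only : List (String × List Int)), Dom_smokers_age_representation_calc smokers_only → Pre_smokers_age_representation_calc smokers_only → Spec_smokers_age_representation_calc smokers_only (smokers_age_representation_calc smokers_only)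

-- ===== LEMMAS AND PROOFS =====

-- A's fold over the 5-slot state pins each slot to (initial value + bucket count)
lemma foldA_eq (ages : List Int) (x0 x1 x2 x3 x4 : Int) :
    ages.foldl pvStepA [x0, x1, x2, x3, x4] =
      [x0 + (ages.countP (fun a => decide (a ≤ 25)) : Int),
       x1 + (ages.countP (fun a => decide (25 < a ∧ a ≤ 35)) : Int),
       x2 + (ages.countP (fun a => decide (35 < a ∧ a ≤ 45)) : Int),
       x3 + (ages.countP (fun a => decide (45 < a ∧ a ≤ 55)) : Int),
       x4 + (ages.countP (fun a => decide (55 < a)) : Int)] := by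
  induction ages generalizing x0 x1 x2 x3 x4 with
  | nil => simp
  | cons a t ih =>
    simp only [List.foldl_cons, pvStepA]
    by_cases h1 : a ≤ 25
    · simp only [if_pos h1]
      simp only [List.getD, List.set]
      simp [ih, h1, not_lt.mpr h1,
            not_lt.mpr (by omega : a ≤ 35), not_lt.mpr (by omega : a ≤ 45),
            not_lt.mpr (by omega : a ≤ 55)]
      omega
    · by_cases h2 : a ≤ 35
      · simp only [if_neg h1, if_pos h2]
        simp only [List.getD, List.set]
        simp [ih, h1, h2, not_le.mp h1,
              not_lt.mpr h2, not_lt.mpr (by omega : a ≤ 45), not_lt.mpr (by omega : a ≤ 55)]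
        omega
      · by_cases h3 : a ≤ 45
        · simp only [if_neg h1, if_neg h2, if_pos h3]
          simp only [List.getD, List.set]
          simp [ih, h1, h2, h3, not_le.mp h2,
                not_lt.mpr h3, not_lt.mpr (by omega : a ≤ 55)]
          omega
        · by_cases h4 : a ≤ 55
          · simp only [if_neg h1, if_neg h2, if_neg h3, if_pos h4]
            simp only [List.getD, List.set]
            simp [ih, h1, h2, h3, h4, not_le.mp h3,
                  not_lt.mpr h4]
            omega
          · simp only [if_neg h1, if_neg h2, if_neg h3, if_neg h4]
            simp only [List.getD, List.set]
            simp [ih, h1, h2, h3, h4, not_le.mp h4]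
            omega

-- cumulative counts split at a boundary
lemma countP_split (ages : List Int) (c d : Int) (h : c ≤ d) :
    ages.countP (fun a => decide (a ≤ d)) =
      ages.countP (fun a => decide (a ≤ c)) + ages.countP (fun a => decide (c < a ∧ a ≤ d)) := by
  induction ages with
  | nil => simp
  | cons a t ih =>
    simp only [List.countP_cons, ih]
    by_cases h1 : a ≤ c
    · simp [h1, le_trans h1 h, not_lt.mpr h1]
      omega
    · by_cases h2 : a ≤ d <;> simp [h1, h2, not_le.mp h1] <;> omega

lemma countP_le_add_gt (ages : List Int) (c : Int) :
    ages.countP (fun a => decide (a ≤ c)) + ages.countP (fun a => decide (c < a)) = ages.length := by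
  induction ages with
  | nil => simp
  | cons a t ih =>
    simp only [List.countP_cons, List.length_cons]
    by_cases h1 : a ≤ c
    · simp [h1, not_lt.mpr h1]; omega
    · simp [h1, not_le.mp h1]; omega

-- ===== VERDICT (by name: the statement is the Claim_ definition above) =====
theorem smokers_age_representation_calc_spec : Claim_equal_smokers_age_representation_calc := by
  intro so _ hpre
  unfold Spec_smokers_age_representation_calc
  unfold smokers_age_representation_calc smokers_age_representation_calc_alt
  have : pvLookupAge so ≠ none := by
    unfold pvLookupAge
    simp only [Ne, Option.map_eq_none_iff, List.find?_eq_none]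
    push Not
    unfold Pre_smokers_age_representation_calc at hpre
    obtain ⟨p, hp, hkey⟩ := List.mem_map.mp hpre
    exact ⟨p, hp, by simp [hkey]⟩
  obtain ⟨ages, hages⟩ := Option.ne_none_iff_exists'.mp this
  rw [hages]
  simp only [foldA_eq]
  have h1 := countP_split ages 25 35 (by norm_num)
  have h2 := countP_split ages 35 45 (by norm_num)
  have h3 := countP_split ages 45 55 (by norm_num)
  have h4 := countP_le_add_gt ages 55
  norm_num [List.getD]
  norm_num at h1 h2 h3
  refine ⟨by omega, by omega, by omega, by omega⟩
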